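-- pv_equiv track=rewrite | github.com/dannxdev/code-playground | python/exercises/university-problems/2025/16-04/fase-3/fase3_problema_matrices_unad.py | calcular_mejor_registro_individual
-- ===== SOURCE A (Python) =====
-- def calcular_mejor_registro_individual(registro: dict):
--     """
--     Recibe el diccionario resultado de la funcion atletas_cumplen_rango_tiempo(registro),
--     luego obtiene el mejor tiempo de cada atleta, y elige cual de todos es mejor.
--     """
--
--     # Creando un diccionario con cada atleta y su mejor tiempo:
--     atletas_con_mejor_tiempo = {atleta: min(tiempos)
--                                 for atleta, tiempos in registro.items()}
--
--     # Creando u diccionario que almacenara los atletas con igual mejor tiempo: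
--     atleta_mejor_tiempo = {}
--
--     # Iterando cada atleta y su mejor tiempo del diccionario mejor_tiempo_atletas:
--     for atleta, tiempo in atletas_con_mejor_tiempo.items():
--         if tiempo == min(atletas_con_mejor_tiempo.values()):
--             # Si el tiempo del atleta es igual al mejor tiempo calculado
--             # se anade al diccioanrio atletas_con_mejor_tiempo
--             atleta_mejor_tiempo[atleta] = tiempo
--
--     # Devuelve el diccionario con el o los atletas con mejor tiempo.
--     return atleta_mejor_tiempo
-- ===== SOURCE B (Python) =====
-- def calcular_mejor_registro_individual(registro: dict):
--     """Single pass: keep the running best time and the dict of athletes tied at it."""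
--     mejor = None
--     resultado = {}
--     for atleta, tiempos in registro.items():
--         t = min(tiempos)
--         if mejor is None or t < mejor:
--             mejor = t
--             resultado = {atleta: t}
--         elif t == mejor:
--             resultado[atleta] = t
--     return resultado
-- ===== Notes on version B (the rewrite author's own statement) =====
-- stated objective: faster
-- what changed: Replaces A's two-phase table-then-filter (which recomputes min over all best times inside the loop) with one pass that maintains the running minimum and the group of athletes tied at it.
import Mathlib
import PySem

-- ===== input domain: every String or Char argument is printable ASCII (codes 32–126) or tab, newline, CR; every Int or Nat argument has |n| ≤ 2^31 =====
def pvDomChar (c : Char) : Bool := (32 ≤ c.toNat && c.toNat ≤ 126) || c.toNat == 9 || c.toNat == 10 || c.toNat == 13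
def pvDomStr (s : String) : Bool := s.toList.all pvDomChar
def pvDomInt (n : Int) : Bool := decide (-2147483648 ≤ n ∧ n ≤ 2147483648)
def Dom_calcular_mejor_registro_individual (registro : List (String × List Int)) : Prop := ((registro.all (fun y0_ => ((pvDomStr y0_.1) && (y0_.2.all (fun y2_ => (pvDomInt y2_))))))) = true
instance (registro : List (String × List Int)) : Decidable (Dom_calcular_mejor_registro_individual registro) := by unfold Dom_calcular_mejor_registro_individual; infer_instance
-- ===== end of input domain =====

-- B replaces A's build-table-then-filter (with min(values()) recomputed inside the loop) by a
-- single running-minimum pass; equivalence of the two is proved on all inputs where A returns.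

-- ===== PORT A =====
-- min(l) for a nonempty list; l = [] is Python's ValueError, excluded by Pre_ (default 0 unreachable there)
def pymin (l : List Int) : Int := (PySem.List.min? l (fun x => x)).getD 0

-- A, step for step. The input dict is the assoc list collapsed to unique keys (PySem.Dict.ofList).
-- The comprehension dict 'atletas_con_mejor_tiempo' has the same (unique) keys, so its items are the
-- mapped list 'best' and its values() are 'best.map Prod.snd'; the result dict 'atleta_mejor_tiempo'
-- only ever assigns fresh keys (keys of best are unique), so d[k]=v appends.
def calcular_mejor_registro_individual (registro : List (String × List Int)) : List (String × Int) :=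
  let items := (PySem.Dict.ofList registro).items
  let best := items.map (fun p => (p.1, pymin p.2))
  best.foldl (fun acc p => if p.2 = pymin (best.map Prod.snd) then acc ++ [p] else acc) []

-- ===== PORT B =====
-- one loop step of B: state = (mejor : Option Int, resultado); a is the athlete, t = min(tiempos)
def pasoB (st : Option Int × List (String × Int)) (a : String) (t : Int) :
    Option Int × List (String × Int) :=
  match st with
  | (none, _) => (some t, [(a, t)])
  | (some m, res) =>
      if t < m then (some t, [(a, t)])
      else if t = m then (some m, res ++ [(a, t)])
      else (some m, res)

-- B, step for step: single pass over the dict's items keeping the running best and its group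
-- (resultado[atleta]=t always adds a fresh key — dict keys are unique — so it appends).
def calcular_mejor_registro_individual_alt (registro : List (String × List Int)) : List (String × Int) :=
  (((PySem.Dict.ofList registro).items).foldl
      (fun st p => pasoB st p.1 (pymin p.2)) ((none : Option Int), ([] : List (String × Int)))).2

-- ===== PRECONDITION & SPEC =====
-- Pre_ excludes exactly the inputs on which A raises ValueError: some athlete's (surviving) time list is empty.
def Pre_calcular_mejor_registro_individual (registro : List (String × List Int)) : Prop :=
  ∀ p ∈ (PySem.Dict.ofList registro).items, p.2 ≠ []
instance (registro : List (String × List Int)) : Decidable (Pre_calcular_mejor_registro_individual registro) := by unfold Pre_calcular_mejor_registro_individual; infer_instance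

def pvWitness_calcular_mejor_registro_individual : (List (String × List Int)) :=
  [("ana", [3, 5]), ("bob", [4]), ("eva", [3, 9])]

def Spec_calcular_mejor_registro_individual (registro : List (String × List Int)) (out : List (String × Int)) : Prop := out = calcular_mejor_registro_individual_alt registro
instance (registro : List (String × List Int)) (out : List (String × Int)) : Decidable (Spec_calcular_mejor_registro_individual registro out) := by unfold Spec_calcular_mejor_registro_individual; infer_instance

-- ===== CLAIM (what is proved, stated in full; the proofs are below) =====
def Claim_equal_calcular_mejor_registro_individual : Prop := ∀ (registro : List (String × List Int)), Dom_calcular_mejor_registro_individual registro → Pre_calcular_mejor_registro_individual registro → Spec_calcular_mejor_registro_individual registro (calcular_mejor_registro_individual registro)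

-- ===== LEMMAS AND PROOFS =====

-- running minimum of the values of a pair list, seeded with m
def runMin (t : List (String × Int)) (m : Int) : Int :=
  t.foldl (fun a p => min a p.2) m

theorem runMin_le (t : List (String × Int)) (m : Int) : runMin t m ≤ m := by
  induction t generalizing m with
  | nil => simp [runMin]
  | cons q r ih =>
      have := ih (min m q.2)
      simp only [runMin, List.foldl_cons] at *
      exact le_trans this (min_le_left _ _)

theorem pasoB_none (res : List (String × Int)) (a : String) (t : Int) :
    pasoB (none, res) a t = (some t, [(a, t)]) := rfl

theorem pasoB_lt {m t : Int} (h : t < m) (res : List (String × Int)) (a : String) :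
    pasoB (some m, res) a t = (some t, [(a, t)]) := by simp [pasoB, h]

theorem pasoB_eq (m : Int) (res : List (String × Int)) (a : String) :
    pasoB (some m, res) a m = (some m, res ++ [(a, m)]) := by simp [pasoB]

theorem pasoB_gt {m t : Int} (h : m < t) (res : List (String × Int)) (a : String) :
    pasoB (some m, res) a t = (some m, res) := by
  have h1 : ¬ t < m := not_lt_of_gt h
  have h2 : ¬ t = m := by omega
  simp [pasoB, h1, h2]

-- invariant of B's loop after the first element has been seen
theorem pasoB_invariant (t : List (String × Int)) :
    ∀ (m : Int) (res : List (String × Int)),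
      t.foldl (fun st p => pasoB st p.1 p.2) (some m, res) =
        (some (runMin t m),
         (if runMin t m = m then res else []) ++
           t.filter (fun p => decide (p.2 = runMin t m))) := by
  induction t with
  | nil => intro m res; simp [runMin]
  | cons q r ih =>
      intro m res
      have hrm : runMin (q :: r) m = runMin r (min m q.2) := by simp [runMin]
      rw [List.foldl_cons]
      rcases lt_trichotomy q.2 m with hlt | heq | hgt
      · have h1 : min m q.2 = q.2 := min_eq_right (le_of_lt hlt)
        have hle := runMin_le r q.2
        rw [pasoB_lt hlt res q.1]
        rw [ih q.2 [(q.1, q.2)], hrm, h1]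
        have hne : runMin r q.2 ≠ m := by omega
        rw [if_neg hne]
        by_cases hq : runMin r q.2 = q.2
        · simp [hq]
        · simp [hq, Ne.symm hq]
      · subst heq
        rw [pasoB_eq q.2 res q.1]
        rw [ih q.2 (res ++ [(q.1, q.2)]), hrm, min_self]
        by_cases hq : runMin r q.2 = q.2
        · simp [hq]
        · simp [hq, Ne.symm hq]
      · have h1 : min m q.2 = m := min_eq_left (le_of_lt hgt)
        rw [pasoB_gt hgt res q.1]
        rw [ih m res, hrm, h1]
        have hle := runMin_le r m
        have hqne : ¬ q.2 = runMin r m := by omega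
        simp [hqne]

-- both sides, as functions of the already-minimised pair list
theorem core (lb : List (String × Int)) :
    lb.foldl (fun acc p => if p.2 = pymin (lb.map Prod.snd) then acc ++ [p] else acc) [] =
      (lb.foldl (fun st p => pasoB st p.1 p.2) ((none : Option Int), ([] : List (String × Int)))).2 := by
  cases lb with
  | nil => rfl
  | cons q r =>
      have hmin : pymin ((q :: r).map Prod.snd) = runMin r q.2 := by
        simp only [pymin, List.map_cons, PySem.List.min?_id_cons, Option.getD_some, runMin]
        rw [List.foldl_map]
      rw [PySem.List.foldl_append_ite_eq_filter]
      rw [List.foldl_cons]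
      rw [pasoB_none [] q.1 q.2]
      rw [pasoB_invariant r q.2 [(q.1, q.2)]]
      have hle := runMin_le r q.2
      simp only [hmin, List.nil_append, List.filter_cons]
      by_cases hq : q.2 = runMin r q.2
      · simp [← hq]
      · have : ¬ runMin r q.2 = q.2 := fun h => hq h.symm
        simp [hq, this]

-- B's fold computing pymin inline is the fold over the mapped ("best") list
theorem alt_fold (l : List (String × List Int)) (i : Option Int × List (String × Int)) :
    l.foldl (fun st p => pasoB st p.1 (pymin p.2)) i =
      (l.map (fun p => (p.1, pymin p.2))).foldl (fun st p => pasoB st p.1 p.2) i := by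
  rw [List.foldl_map]

-- ===== VERDICT (by name: the statement is the Claim_ definition above) =====
theorem calcular_mejor_registro_individual_spec : Claim_equal_calcular_mejor_registro_individual := by
  intro registro _ _
  unfold Spec_calcular_mejor_registro_individual
  unfold calcular_mejor_registro_individual calcular_mejor_registro_individual_alt
  dsimp only
  rw [alt_fold]
  exact core ((PySem.Dict.ofList registro).items.map (fun p => (p.1, pymin p.2)))
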